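-- pv_equiv track=rewrite | github.com/BQSKit/bqskit | bqskit/passes/synthesis/qpredict.py | decode_qubits
-- ===== SOURCE A (Python) =====
-- def decode_qubits(pauli_coef_index: int) -> list[int]:
--     """Decode `pauli_coef_index` into qubit indices."""
--     qubit_indices = []
--     qudit_index = 0
--     while pauli_coef_index > 0:
--         if ((pauli_coef_index & 3) >> 1) | (pauli_coef_index & 1):
--             qubit_indices.append(qudit_index)
--         pauli_coef_index >>= 2
--         qudit_index += 1
--     return qubit_indices
-- ===== SOURCE B (Python) =====
-- def decode_qubits(pauli_coef_index: int) -> list[int]: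
--     """Decode `pauli_coef_index` into qubit indices."""
--     qubit_indices = []
--     n = pauli_coef_index
--     pos = 0
--     while n > 0:
--         if n % 2:
--             idx = pos // 2
--             if not qubit_indices or qubit_indices[-1] != idx:
--                 qubit_indices.append(idx)
--         n //= 2
--         pos += 1
--     return qubit_indices
-- ===== Notes on version B (the rewrite author's own statement) =====
-- stated objective: alternative
-- what changed: B scans one bit at a time (halving n each step) and collapses both bits of each base-four digit by a dedup-on-last-element check, instead of A's masking of one two-bit base-four digit per iteration.
import Mathlib
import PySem

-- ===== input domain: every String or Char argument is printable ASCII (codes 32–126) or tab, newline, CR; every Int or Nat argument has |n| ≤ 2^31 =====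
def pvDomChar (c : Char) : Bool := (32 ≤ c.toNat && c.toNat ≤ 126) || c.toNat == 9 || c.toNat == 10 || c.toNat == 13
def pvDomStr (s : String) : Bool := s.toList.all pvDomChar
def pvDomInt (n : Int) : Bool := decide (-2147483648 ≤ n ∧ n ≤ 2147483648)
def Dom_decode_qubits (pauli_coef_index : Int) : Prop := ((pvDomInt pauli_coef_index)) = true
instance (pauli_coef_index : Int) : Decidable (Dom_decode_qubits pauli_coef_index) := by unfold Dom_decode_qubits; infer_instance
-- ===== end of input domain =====

-- B decodes per single bit with a dedup-on-last check instead of A's per-base-four-digit mask: an alternative decomposition of the same decoding.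

-- ===== PORT A =====
-- A's while loop as structural recursion on the loop state (n, qudit_index, qubit_indices)
def decode_qubits_go (n q : Int) (acc : List Int) : List Int :=
  if _h : 0 < n then
    decode_qubits_go (n >>> (2:Nat)) (q + 1)
      (if PySem.Int.bor ((PySem.Int.band n 3) >>> (1:Nat)) (PySem.Int.band n 1) ≠ 0 then acc ++ [q] else acc)
  else acc
termination_by n.toNat
decreasing_by
  have : n >>> (2:Nat) = n / 4 := by
    have := Int.shiftRight_eq_div_pow n 2
    simpa using this
  omega

def decode_qubits (pauli_coef_index : Int) : List Int :=
  decode_qubits_go pauli_coef_index 0 []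

-- ===== PORT B =====
-- B's while loop as structural recursion on the loop state (n, pos, qubit_indices)
def decode_qubits_alt_go (n pos : Int) (acc : List Int) : List Int :=
  if _h : 0 < n then
    decode_qubits_alt_go (PySem.Int.floordiv n 2) (pos + 1)
      (if PySem.Int.mod n 2 ≠ 0 then
        (if acc = [] ∨ acc.getLast? ≠ some (PySem.Int.floordiv pos 2) then
          acc ++ [PySem.Int.floordiv pos 2] else acc)
       else acc)
  else acc
termination_by n.toNat
decreasing_by
  have : PySem.Int.floordiv n 2 = n / 2 := PySem.Int.floordiv_eq_ediv_of_pos (by norm_num)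
  omega

def decode_qubits_alt (pauli_coef_index : Int) : List Int :=
  decode_qubits_alt_go pauli_coef_index 0 []

-- ===== PRECONDITION & SPEC =====
def Spec_decode_qubits (pauli_coef_index : Int) (out : List Int) : Prop := out = decode_qubits_alt pauli_coef_index
instance (pauli_coef_index : Int) (out : List Int) : Decidable (Spec_decode_qubits pauli_coef_index out) := by unfold Spec_decode_qubits; infer_instance

-- ===== CLAIM (what is proved, stated in full; the proofs are below) =====
def Claim_equal_decode_qubits : Prop := ∀ (pauli_coef_index : Int), Dom_decode_qubits pauli_coef_index → Spec_decode_qubits pauli_coef_index (decode_qubits pauli_coef_index)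

-- ===== LEMMAS AND PROOFS =====

-- A's digit test is exactly "the current base-4 digit is nonzero"
lemma cond_A_iff (n : Int) (hn : 0 < n) :
    (PySem.Int.bor ((PySem.Int.band n 3) >>> (1:Nat)) (PySem.Int.band n 1) ≠ 0) ↔ n % 4 ≠ 0 := by
  obtain ⟨m, rfl⟩ : ∃ m : Nat, n = (m:Int) := ⟨n.toNat, by omega⟩
  have h3 : PySem.Int.band (m:Int) 3 = ((m &&& 3 : Nat) : Int) := by
    exact_mod_cast PySem.Int.band_natCast m 3
  have h1 : PySem.Int.band (m:Int) 1 = ((m &&& 1 : Nat) : Int) := by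
    exact_mod_cast PySem.Int.band_natCast m 1
  rw [h3, h1]
  have hs : ((m &&& 3 : Nat) : Int) >>> (1:Nat) = (((m &&& 3) >>> 1 : Nat) : Int) := Int.mem_toNat?.mp rfl
  rw [hs]
  have hb : PySem.Int.bor (((m &&& 3) >>> 1 : Nat) : Int) ((m &&& 1 : Nat) : Int)
      = ((((m &&& 3) >>> 1) ||| (m &&& 1) : Nat) : Int) := by
    exact_mod_cast PySem.Int.bor_natCast _ _
  rw [hb]
  have e3 : m &&& 3 = m % 4 := by
    have := Nat.and_two_pow_sub_one_eq_mod m 2; simpa using this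
  have e1 : m &&& 1 = m % 2 := by
    have := Nat.and_two_pow_sub_one_eq_mod m 1; simpa using this
  rw [e3, e1, Nat.shiftRight_one]
  have hx : m % 4 / 2 = 0 ∨ m % 4 / 2 = 1 := by omega
  have hy : m % 2 = 0 ∨ m % 2 = 1 := by omega
  have hmod : (m:Int) % 4 = ((m % 4 : Nat) : Int) := by push_cast; rfl
  rw [hmod]
  rcases hx with hx | hx <;> rcases hy with hy | hy <;> rw [hx, hy] <;> simp <;> omega

-- one unfolding of A's loop, with the shift and mask turned into division and remainder
lemma A_step (n q : Int) (acc : List Int) (hn : 0 < n) :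
    decode_qubits_go n q acc
      = decode_qubits_go (n / 4) (q + 1) (if n % 4 ≠ 0 then acc ++ [q] else acc) := by
  rw [decode_qubits_go, dif_pos hn]
  have hs : n >>> (2:Nat) = n / 4 := by
    have := Int.shiftRight_eq_div_pow n 2
    simpa using this
  rw [hs]
  by_cases h4 : n % 4 = 0 <;> simp [cond_A_iff n hn, h4]

lemma A_nil (n q : Int) (acc : List Int) (hn : ¬ 0 < n) : decode_qubits_go n q acc = acc := by
  rw [decode_qubits_go, dif_neg hn]

-- one unfolding of B's loop, with floordiv/mod turned into Lean's / and %
lemma B_step (n pos : Int) (acc : List Int) (hn : 0 < n) :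
    decode_qubits_alt_go n pos acc
      = decode_qubits_alt_go (n / 2) (pos + 1)
        (if n % 2 ≠ 0 then
          (if acc = [] ∨ acc.getLast? ≠ some (pos / 2) then acc ++ [pos / 2] else acc)
         else acc) := by
  rw [decode_qubits_alt_go, dif_pos hn]
  rw [PySem.Int.floordiv_eq_ediv_of_pos (by norm_num : (0:Int) < 2),
      PySem.Int.mod_eq_emod_of_pos (by norm_num : (0:Int) < 2),
      PySem.Int.floordiv_eq_ediv_of_pos (by norm_num : (0:Int) < 2)]

lemma B_nil (n pos : Int) (acc : List Int) (hn : ¬ 0 < n) : decode_qubits_alt_go n pos acc = acc := by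
  rw [decode_qubits_alt_go, dif_neg hn]

-- key loop correspondence: A's loop at digit q equals B's loop at bit position 2*q,
-- provided every possible last element of acc is below q
lemma key (k : Nat) : ∀ (n q : Int) (acc : List Int), n.toNat ≤ k →
    (∀ l ∈ acc.getLast?, l < q) →
    decode_qubits_go n q acc = decode_qubits_alt_go n (2 * q) acc := by
  induction k with
  | zero =>
    intro n q acc hk _
    have hn : ¬ 0 < n := by omega
    rw [A_nil n q acc hn, B_nil n (2*q) acc hn]
  | succ k ih =>
    intro n q acc hk hinv
    by_cases hn : 0 < n
    · -- B's dedup condition at idx = q is true under the invariant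
      have hded : (acc = [] ∨ acc.getLast? ≠ some q) := by
        rcases h : acc.getLast? with _ | l
        · left; exact List.getLast?_eq_none_iff.mp h
        · right; have := hinv l (by simp [h]); simp only [ne_eq, Option.some.injEq]; omega
      have hq1 : (2*q)/2 = q := by omega
      have hq2 : (2*q+1)/2 = q := by omega
      rw [A_step n q acc hn, B_step n (2*q) acc hn, hq1]
      by_cases hn2 : 0 < n / 2
      · rw [B_step (n/2) (2*q+1) _ hn2, hq2]
        have hdd : (n/2)/2 = n/4 := by omega
        rw [hdd]
        have hacc : (if (n/2) % 2 ≠ 0 then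
              (if (if n % 2 ≠ 0 then (if acc = [] ∨ acc.getLast? ≠ some q then acc ++ [q] else acc) else acc) = []
                  ∨ (if n % 2 ≠ 0 then (if acc = [] ∨ acc.getLast? ≠ some q then acc ++ [q] else acc) else acc).getLast? ≠ some q
               then (if n % 2 ≠ 0 then (if acc = [] ∨ acc.getLast? ≠ some q then acc ++ [q] else acc) else acc) ++ [q]
               else (if n % 2 ≠ 0 then (if acc = [] ∨ acc.getLast? ≠ some q then acc ++ [q] else acc) else acc))
             else (if n % 2 ≠ 0 then (if acc = [] ∨ acc.getLast? ≠ some q then acc ++ [q] else acc) else acc))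
            = (if n % 4 ≠ 0 then acc ++ [q] else acc) := by
          by_cases h0 : n % 2 = 0
          · have h4 : n % 4 ≠ 0 ↔ (n/2) % 2 ≠ 0 := by omega
            by_cases h1 : (n/2) % 2 = 0 <;> simp [h0, h1, hded, h4]
          · have h4 : n % 4 ≠ 0 := by omega
            by_cases h1 : (n/2) % 2 = 0 <;>
              simp [h0, h1, hded, h4]
        rw [hacc]
        have hmul : 2*q + 1 + 1 = 2 * (q + 1) := by ring
        rw [hmul]
        apply ih
        · omega
        · intro l hl
          by_cases h4 : n % 4 = 0
          · simp [h4] at hl; have := hinv l hl; omega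
          · simp [h4] at hl; omega
      · -- n = 1: A stops after this digit, B stops after this bit
        have h1 : n = 1 := by omega
        subst h1
        rw [B_nil _ _ _ hn2, A_nil _ _ _ (by norm_num : ¬ (0:Int) < 1/4)]
        simp [hded]
    · rw [A_nil n q acc hn, B_nil n (2*q) acc hn]

-- ===== VERDICT (by name: the statement is the Claim_ definition above) =====
theorem decode_qubits_spec : Claim_equal_decode_qubits := by
  intro n _
  unfold Spec_decode_qubits decode_qubits decode_qubits_alt
  simpa using key n.toNat n 0 [] le_rfl (by simp)
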